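-- pv_equiv track=rewrite | github.com/Jinghe-John/AI_project_workflow | process_en.py | build_introductory_part
-- ===== SOURCE A (Python) =====
-- def _collect_intro_content(
--     data: list[dict],
--     first_title_idx: int,
--     intro_title_idx: int,
--     next_title_idx: int,
-- ) -> list[str]:
--     """
--     Collect text content between first_title_idx and intro_title_idx,
--     append the intro title itself, then append text up to next_title_idx.
--     """
--     parts: list[str] = []
--
--     for i in range(first_title_idx + 1, intro_title_idx):
--         if data[i].get("type") == "text":
--             parts.append(data[i]["content"])
--
--     parts.append(data[intro_title_idx]["content"])
--
--     end = next_title_idx if next_title_idx != -1 else len(data)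
--     for i in range(intro_title_idx + 1, end):
--         if data[i].get("type") == "text":
--             parts.append(data[i]["content"])
--
--     return parts
--
-- def build_introductory_part(data: list[dict]) -> tuple[list[dict], bool, str]:
--     """
--     Primary strategy: locate a title that contains 'introduction' or starts with
--     1 / 1. / I / I. and use it as the boundary for the Introductory-Part block.
--
--     Returns (new_data, success, description).
--     """
--     if not data:
--         return data, False, "Empty data."
--
--     title_indices = [i for i, b in enumerate(data) if b.get("type") == "title"]
--     if not title_indices:
--         return data, False, "No title blocks found."
--
--     first_idx  = title_indices[0]
--     first_text = data[first_idx]["content"]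
--
--     # Find the introduction title
--     intro_idx  = -1
--     intro_text = ""
--     for i in title_indices:
--         if i <= first_idx:
--             continue
--         raw   = data[i].get("content", "").strip()
--         clean = raw.lstrip("#").lstrip("*").strip()
--         lower = clean.lower()
--         if (
--             "introduction" in lower
--             or clean.startswith("1")
--             or clean.startswith("1.")
--             or clean.startswith("I")
--             or clean.startswith("I.")
--         ):
--             intro_idx  = i
--             intro_text = raw
--             break
--
--     if intro_idx == -1:
--         return data, False, f"No introduction title found. First title: '{first_text}'."
--
--     # Find the title immediately after the introduction
--     next_idx = next((i for i in title_indices if i > intro_idx), -1)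
--
--     parts    = _collect_intro_content(data, first_idx, intro_idx, next_idx)
--     new_data = [
--         {"type": "Title",             "content": first_text},
--         {"type": "introductory-part", "content": " ".join(parts)},
--     ]
--     if next_idx != -1:
--         new_data.extend(data[next_idx:])
--
--     return new_data, True, f"Introductory-part built; intro title: '{intro_text}'."
-- ===== SOURCE B (Python) =====
-- def _intro_check(block):
--     """Return (matches, raw) for the intro-title predicate used on a title block."""
--     raw = block.get("content", "").strip()
--     clean = raw.lstrip("#").lstrip("*").strip()
--     return ("introduction" in clean.lower()
--             or clean.startswith("1")
--             or clean.startswith("I")), raw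
--
--
-- def build_introductory_part(data: list[dict]) -> tuple[list[dict], bool, str]:
--     if not data:
--         return data, False, "Empty data."
--
--     # One stateful linear scan:
--     # state 0 = before the first title, 1 = intro not yet found, 2 = collecting
--     # after the intro, 3 = tail boundary found.
--     state = 0
--     first_text = ""
--     intro_text = ""
--     parts = []
--     tail = []
--     for i, block in enumerate(data):
--         t = block.get("type")
--         if state == 0:
--             if t == "title":
--                 first_text = block["content"]
--                 state = 1
--         elif state == 1:
--             if t == "title":
--                 ok, raw = _intro_check(block)
--                 if ok:
--                     intro_text = raw
--                     parts.append(block["content"])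
--                     state = 2
--             elif t == "text":
--                 parts.append(block["content"])
--         else:  # state == 2
--             if t == "title":
--                 tail = data[i:]
--                 state = 3
--                 break
--             if t == "text":
--                 parts.append(block["content"])
--
--     if state == 0:
--         return data, False, "No title blocks found."
--     if state == 1:
--         return data, False, f"No introduction title found. First title: '{first_text}'."
--
--     new_data = [
--         {"type": "Title", "content": first_text},
--         {"type": "introductory-part", "content": " ".join(parts)},
--     ]
--     return new_data + tail, True, f"Introductory-part built; intro title: '{intro_text}'."
-- ===== Notes on version B (the rewrite author's own statement) =====
-- stated objective: alternative
-- what changed: Replaces A's index-list strategy (enumerate to collect all title indices, then three separate index-range passes over data) by a single stateful linear scan that finds the first title, tests the intro predicate on later titles, buffers text contents as it goes and cuts the tail at the next title.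
import Mathlib
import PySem

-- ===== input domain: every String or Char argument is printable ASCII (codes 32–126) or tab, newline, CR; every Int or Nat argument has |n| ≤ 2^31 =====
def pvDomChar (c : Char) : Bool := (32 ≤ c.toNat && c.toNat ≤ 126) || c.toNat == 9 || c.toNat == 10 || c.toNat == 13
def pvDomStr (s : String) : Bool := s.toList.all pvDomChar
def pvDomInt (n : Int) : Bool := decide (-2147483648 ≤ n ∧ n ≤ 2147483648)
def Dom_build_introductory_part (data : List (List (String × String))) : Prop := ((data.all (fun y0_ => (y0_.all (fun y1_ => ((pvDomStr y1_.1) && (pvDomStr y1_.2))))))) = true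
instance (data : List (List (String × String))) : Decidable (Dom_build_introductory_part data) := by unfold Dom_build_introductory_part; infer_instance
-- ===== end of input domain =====

-- B re-implements the extraction as ONE stateful linear scan (no title-index list, no
-- index ranges); equivalence is about the return value only (neither program mutates data).

-- ===== PORT A =====
-- shared basic accessors (dict lookups of the blocks)
def pvTy (b : List (String × String)) : Option String := (PySem.Dict.mk b).get? "type"
-- block["content"] raises KeyError when absent; Pre_ excludes that, so getD "" is exact on Pre_
def pvContent (b : List (String × String)) : String := (PySem.Dict.mk b).getD "content" ""
-- s.lstrip(c) for a single-character set: drop exactly the leading occurrences of c (exact)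
def pvLstrip1 (c : Char) (s : String) : String := String.ofList (s.toList.dropWhile (· == c))

-- A's intro-title predicate on raw = block.get("content","").strip()
def pvIntroPredA (raw : String) : Bool :=
  let clean := PySem.Str.strip (pvLstrip1 '*' (pvLstrip1 '#' raw))
  PySem.Str.isIn "introduction" (PySem.Str.lower clean)
  || PySem.Str.startswith clean "1" || PySem.Str.startswith clean "1."
  || PySem.Str.startswith clean "I" || PySem.Str.startswith clean "I."

-- _collect_intro_content, with its two index-range loops
def pvCollectA (data : List (List (String × String))) (first intro next_ : Int) : List String :=
  let parts := (PySem.List.pyRange (first + 1) intro).foldl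
    (fun acc i => if pvTy (PySem.List.pyGetD data i []) == some "text"
                  then acc ++ [pvContent (PySem.List.pyGetD data i [])] else acc) []
  let parts := parts ++ [pvContent (PySem.List.pyGetD data intro [])]
  let e : Int := if next_ ≠ -1 then next_ else (data.length : Int)
  (PySem.List.pyRange (intro + 1) e).foldl
    (fun acc i => if pvTy (PySem.List.pyGetD data i []) == some "text"
                  then acc ++ [pvContent (PySem.List.pyGetD data i [])] else acc) parts

def build_introductory_part (data : List (List (String × String))) :
    (List (List (String × String))) × Bool × String :=
  if data = [] then (data, false, "Empty data.")
  else
    let title_indices :=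
      ((PySem.List.enumerate data 0).filter (fun pr => pvTy pr.2 == some "title")).map (·.1)
    match title_indices with
    | [] => (data, false, "No title blocks found.")
    | first_idx :: _ =>
      let first_text := pvContent (PySem.List.pyGetD data first_idx [])
      -- the for/break search over title_indices, skipping i <= first_idx
      match title_indices.find?
          (fun i => !(i ≤ first_idx) &&
            pvIntroPredA (PySem.Str.strip (pvContent (PySem.List.pyGetD data i [])))) with
      | none => (data, false,
          "No introduction title found. First title: '" ++ first_text ++ "'.")
      | some intro_idx =>
        let intro_text := PySem.Str.strip (pvContent (PySem.List.pyGetD data intro_idx []))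
        let next_idx : Int :=
          match title_indices.find? (fun i => decide (intro_idx < i)) with
          | some j => j
          | none => -1
        let parts := pvCollectA data first_idx intro_idx next_idx
        let new_data :=
          [[("type", "Title"), ("content", first_text)],
           [("type", "introductory-part"), ("content", PySem.Str.join " " parts)]]
          ++ (if next_idx ≠ -1 then PySem.List.slice data (some next_idx) none else [])
        (new_data, true, "Introductory-part built; intro title: '" ++ intro_text ++ "'.")

-- ===== PORT B =====
-- B's intro check on a title block: (matches, raw)
def pvIntroCheckB (b : List (String × String)) : Bool × String :=
  let raw := PySem.Str.strip ((PySem.Dict.mk b).getD "content" "")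
  let clean := PySem.Str.strip (pvLstrip1 '*' (pvLstrip1 '#' raw))
  (PySem.Str.isIn "introduction" (PySem.Str.lower clean)
   || PySem.Str.startswith clean "1" || PySem.Str.startswith clean "I", raw)

-- the single stateful scan; the enumerate list drives the recursion, `data` is only sliced for the tail
def pvScanB (data : List (List (String × String))) (state : Nat) (first intro : String)
    (parts : List String) :
    List (Int × List (String × String)) →
      Nat × String × String × List String × List (List (String × String))
  | [] => (state, first, intro, parts, [])
  | (i, b) :: rest =>
    let t := pvTy b
    if state = 0 then
      if t == some "title" then pvScanB data 1 (pvContent b) intro parts rest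
      else pvScanB data 0 first intro parts rest
    else if state = 1 then
      if t == some "title" then
        let c := pvIntroCheckB b
        if c.1 then pvScanB data 2 first c.2 (parts ++ [pvContent b]) rest
        else pvScanB data 1 first intro parts rest
      else if t == some "text" then pvScanB data 1 first intro (parts ++ [pvContent b]) rest
      else pvScanB data 1 first intro parts rest
    else
      if t == some "title" then (3, first, intro, parts, PySem.List.slice data (some i) none)
      else if t == some "text" then pvScanB data 2 first intro (parts ++ [pvContent b]) rest
      else pvScanB data 2 first intro parts rest

def build_introductory_part_alt (data : List (List (String × String))) :
    (List (List (String × String))) × Bool × String :=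
  if data = [] then (data, false, "Empty data.")
  else
    let r := pvScanB data 0 "" "" [] (PySem.List.enumerate data 0)
    match r with
    | (state, first, intro, parts, tail) =>
      if state = 0 then (data, false, "No title blocks found.")
      else if state = 1 then
        (data, false, "No introduction title found. First title: '" ++ first ++ "'.")
      else
        ([[("type", "Title"), ("content", first)],
          [("type", "introductory-part"), ("content", PySem.Str.join " " parts)]] ++ tail,
         true, "Introductory-part built; intro title: '" ++ intro ++ "'.")

-- ===== PRECONDITION & SPEC =====
-- Pre_ excludes inputs on which the Python raises KeyError (a direct block["content"] on a
-- block without that key); it qualitatively requires every "title"/"text" block to carry a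
-- "content" key, which is slightly broader than the exact set of accessed blocks (cites given).
def Pre_build_introductory_part (data : List (List (String × String))) : Prop :=
  ∀ b ∈ data, ((PySem.Dict.mk b).get? "type" = some "title" ∨ (PySem.Dict.mk b).get? "type" = some "text") →
    (PySem.Dict.mk b).contains "content" = true
instance (data : List (List (String × String))) : Decidable (Pre_build_introductory_part data) := by
  unfold Pre_build_introductory_part; infer_instance

def pvWitness_build_introductory_part : (List (List (String × String))) :=
  [[("type", "title"), ("content", "My paper")],
   [("type", "text"), ("content", "abstract")],
   [("type", "title"), ("content", "1. Introduction")],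
   [("type", "text"), ("content", "body")],
   [("type", "title"), ("content", "2. Methods")],
   [("type", "text"), ("content", "later")]]

def Spec_build_introductory_part (data : List (List (String × String))) (out : (List (List (String × String))) × Bool × String) : Prop := out = build_introductory_part_alt data
instance (data : List (List (String × String))) (out : (List (List (String × String))) × Bool × String) : Decidable (Spec_build_introductory_part data out) := by unfold Spec_build_introductory_part; infer_instance

-- ===== CLAIM (what is proved, stated in full; the proofs are below) =====
def Claim_equal_build_introductory_part : Prop := ∀ (data : List (List (String × String))), Dom_build_introductory_part data → Pre_build_introductory_part data → Spec_build_introductory_part data (build_introductory_part data)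

-- ===== LEMMAS AND PROOFS =====

-- shorthand used only by the proofs
def pvIsT (b : List (String × String)) : Bool := pvTy b == some "title"
def pvIsX (b : List (String × String)) : Bool := pvTy b == some "text"
def pvStop (b : List (String × String)) : Bool := pvIsT b && (pvIntroCheckB b).1

theorem pvGetAtK {α : Type} (pre m suf : List α) (d : α) (k : Nat) (hk : k < m.length) :
    PySem.List.pyGetD (pre ++ m ++ suf) ((pre.length : Int) + (k : Int)) d = m[k] := by
  rw [List.append_assoc]
  rw [PySem.List.pyGetD_eq_getElem _ d (by omega) (by simp [List.length_append]; omega)]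
  have h1 : ((pre.length : Int) + (k : Int)).toNat = pre.length + k := by omega
  simp only [h1]
  rw [List.getElem_append_right (by omega)]
  have h2 : pre.length + k - pre.length = k := by omega
  simp only [h2]
  rw [List.getElem_append_left (bs := suf) hk]

theorem pvGetAt {α : Type} (pre : List α) (b : α) (suf : List α) (d : α) :
    PySem.List.pyGetD (pre ++ b :: suf) ((pre.length : Int)) d = b := by
  have h := pvGetAtK pre [b] suf d 0 (by simp)
  rw [show pre ++ [b] ++ suf = pre ++ b :: suf by simp,
      show ((pre.length : Int) + ((0 : Nat) : Int)) = ((pre.length : Int)) by simp] at h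
  rw [h]
  simp

theorem pvMapRange {α : Type} (m : List α) (pre suf : List α) (d : α) :
    ∀ (a : Int), a = pre.length →
      (PySem.List.pyRange a (a + m.length)).map (fun i => PySem.List.pyGetD (pre ++ m ++ suf) i d) = m := by
  induction m generalizing pre with
  | nil => intro a ha; simp
  | cons x t ih =>
    intro a ha
    rw [PySem.List.pyRange_one_cons (by simp)]
    simp only [List.map_cons]
    have hx : PySem.List.pyGetD (pre ++ (x :: t) ++ suf) a d = x := by
      rw [ha, show pre ++ (x :: t) ++ suf = pre ++ x :: (t ++ suf) by simp]
      exact pvGetAt pre x (t ++ suf) d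
    rw [hx]
    have ht := ih (pre ++ [x]) (a + 1) (by simp [ha])
    rw [show pre ++ [x] ++ t ++ suf = pre ++ x :: t ++ suf by simp] at ht
    rw [show a + ((x :: t).length : Int) = a + 1 + (t.length : Int) by simp; omega]
    exact congrArg (x :: ·) ht

theorem pvSwDropDot (s : String) (c : Char) (pre2 pre1 : String)
    (h2 : pre2.toList = [c, '.']) (h1 : pre1.toList = [c])
    (h : PySem.Str.startswith s pre2 = true) : PySem.Str.startswith s pre1 = true := by
  simp only [PySem.Str.startswith, PySem.Chars.startswith, List.isPrefixOf_iff_prefix, h1, h2] at *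
  exact (show [c] <+: [c, '.'] from ⟨['.'], rfl⟩).trans h

theorem pvOrr (a b c d e : Bool) (hc : c = true → b = true) (he : e = true → d = true) :
    (a || b || c || d || e) = (a || b || d) := by
  cases a <;> cases b <;> cases c <;> cases d <;> cases e <;> simp_all

-- A's 5-disjunct predicate and B's 3-disjunct check agree ('1.'/'I.' are subsumed)
theorem pvIntroCheck_fst (b : List (String × String)) :
    (pvIntroCheckB b).1 = pvIntroPredA (PySem.Str.strip (pvContent b)) := by
  simp only [pvIntroCheckB, pvIntroPredA, pvContent]
  rw [pvOrr]
  · intro h; exact pvSwDropDot _ '1' "1." "1" rfl rfl h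
  · intro h; exact pvSwDropDot _ 'I' "I." "I" rfl rfl h

theorem pvIntroCheck_snd (b : List (String × String)) :
    (pvIntroCheckB b).2 = PySem.Str.strip (pvContent b) := rfl

-- the list of title indices, per segment
def pvTiOf (xs : List (List (String × String))) (s : Int) : List Int :=
  ((PySem.List.enumerate xs s).filter (fun pr => pvTy pr.2 == some "title")).map (·.1)

theorem pvTiOf_append (xs ys : List (List (String × String))) (s : Int) :
    pvTiOf (xs ++ ys) s = pvTiOf xs s ++ pvTiOf ys (s + xs.length) := by
  simp [pvTiOf, PySem.List.enumerate_append, List.filter_append]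

theorem pvTiOf_cons (b : List (String × String)) (xs : List (List (String × String))) (s : Int) :
    pvTiOf (b :: xs) s =
      if pvTy b == some "title" then s :: pvTiOf xs (s + 1) else pvTiOf xs (s + 1) := by
  simp only [pvTiOf, PySem.List.enumerate_cons, List.filter_cons]
  split <;> simp_all

theorem pvTiOf_nil (xs : List (List (String × String))) (s : Int)
    (h : ∀ b ∈ xs, (pvTy b == some "title") = false) : pvTiOf xs s = [] := by
  induction xs generalizing s with
  | nil => simp [pvTiOf]
  | cons x t ih =>
    rw [pvTiOf_cons, if_neg (by simp [h x (by simp)])]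
    exact ih (s + 1) (fun b hb => h b (by simp [hb]))

theorem pvFind_tiOf_none (P : Int → Bool) (xs : List (List (String × String))) (s : Int)
    (h : ∀ (k : Nat), (hk : k < xs.length) → (pvTy xs[k] == some "title") = true → P (s + k) = false) :
    (pvTiOf xs s).find? P = none := by
  rw [List.find?_eq_none]
  intro x hx
  simp only [pvTiOf, List.mem_map] at hx
  obtain ⟨pr, hpr, hx1⟩ := hx
  rw [List.mem_filter] at hpr
  obtain ⟨hmem, hT⟩ := hpr
  rw [PySem.List.mem_enumerate_iff] at hmem
  obtain ⟨k, hk, rfl⟩ := hmem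
  simp only at hT hx1
  subst hx1
  simp [h k hk hT]

-- a state-machine step is skipped over a title-free segment (state 0)
theorem pvScanB0 (data : List (List (String × String))) (p : List (List (String × String)))
    (h : ∀ b ∈ p, (pvTy b == some "title") = false) :
    ∀ (s : Int) (rest : List (Int × List (String × String))) (ft it : String) (pts : List String),
      pvScanB data 0 ft it pts (PySem.List.enumerate p s ++ rest) = pvScanB data 0 ft it pts rest := by
  induction p with
  | nil => intro s rest ft it pts; simp [PySem.List.enumerate_nil]
  | cons x t ih =>
    intro s rest ft it pts
    rw [PySem.List.enumerate_cons]
    simp only [List.cons_append, pvScanB, h x (by simp), Bool.false_eq_true, if_false]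
    exact ih (fun b hb => h b (by simp [hb])) (s + 1) rest ft it pts

-- state 1 collects text contents over a segment free of matching intro titles
theorem pvScanB1 (data : List (List (String × String))) (q : List (List (String × String)))
    (h : ∀ b ∈ q, pvStop b = false) :
    ∀ (s : Int) (rest : List (Int × List (String × String))) (ft it : String) (pts : List String),
      pvScanB data 1 ft it pts (PySem.List.enumerate q s ++ rest) =
        pvScanB data 1 ft it (pts ++ (q.filter pvIsX).map pvContent) rest := by
  induction q with
  | nil => intro s rest ft it pts; simp [PySem.List.enumerate_nil]
  | cons x t ih =>
    intro s rest ft it pts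
    have hx := h x (by simp)
    rw [PySem.List.enumerate_cons]
    simp only [List.cons_append, pvScanB]
    by_cases hT : (pvTy x == some "title") = true
    · have hc : (pvIntroCheckB x).1 = false := by
        simp only [pvStop, pvIsT, hT, Bool.true_and] at hx; exact hx
      have hX : pvIsX x = false := by
        simp only [pvIsX]
        have : pvTy x = some "title" := by simpa using hT
        simp [this]
      simp only [hT, hc, Bool.false_eq_true, if_false]
      rw [List.filter_cons_of_neg (by simp [hX])]
      exact ih (fun b hb => h b (by simp [hb])) (s + 1) rest ft it pts
    · simp only [hT]
      by_cases hX : (pvTy x == some "text") = true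
      · simp only [hX]
        rw [List.filter_cons_of_pos (by simpa [pvIsX] using hX)]
        rw [ih (fun b hb => h b (by simp [hb])) (s + 1) rest ft it (pts ++ [pvContent x])]
        simp
      · simp only [hX]
        rw [List.filter_cons_of_neg (by simpa [pvIsX] using hX)]
        exact ih (fun b hb => h b (by simp [hb])) (s + 1) rest ft it pts

-- state 2 collects text contents over a title-free segment
theorem pvScanB2 (data : List (List (String × String))) (u : List (List (String × String)))
    (h : ∀ b ∈ u, (pvTy b == some "title") = false) :
    ∀ (s : Int) (rest : List (Int × List (String × String))) (ft it : String) (pts : List String),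
      pvScanB data 2 ft it pts (PySem.List.enumerate u s ++ rest) =
        pvScanB data 2 ft it (pts ++ (u.filter pvIsX).map pvContent) rest := by
  induction u with
  | nil => intro s rest ft it pts; simp [PySem.List.enumerate_nil]
  | cons x t ih =>
    intro s rest ft it pts
    have hx := h x (by simp)
    rw [PySem.List.enumerate_cons]
    simp only [List.cons_append, pvScanB, hx, Bool.false_eq_true, if_false]
    by_cases hX : (pvTy x == some "text") = true
    · simp only [hX]
      rw [List.filter_cons_of_pos (by simpa [pvIsX] using hX)]
      rw [ih (fun b hb => h b (by simp [hb])) (s + 1) rest ft it (pts ++ [pvContent x])]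
      simp
    · simp only [hX]
      rw [List.filter_cons_of_neg (by simpa [pvIsX] using hX)]
      exact ih (fun b hb => h b (by simp [hb])) (s + 1) rest ft it pts

-- one of A's two range loops, read off the decomposition
theorem pvFoldRange (data pre m suf : List (List (String × String))) (acc : List String)
    (a b : Int) (hdata : data = pre ++ m ++ suf) (ha : a = pre.length) (hb : b = a + m.length) :
    (PySem.List.pyRange a b).foldl
      (fun acc i => if pvTy (PySem.List.pyGetD data i []) == some "text"
                    then acc ++ [pvContent (PySem.List.pyGetD data i [])] else acc) acc
      = acc ++ (m.filter pvIsX).map pvContent := by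
  subst hdata hb
  rw [PySem.List.foldl_append_if (p := fun i => pvTy (PySem.List.pyGetD (pre ++ m ++ suf) i []) == some "text")
      (f := fun i => pvContent (PySem.List.pyGetD (pre ++ m ++ suf) i []))]
  congr 1
  have hg := pvMapRange m pre suf ([] : List (String × String)) a ha
  conv_rhs => rw [← hg]
  rw [List.filter_map, List.map_map]
  rfl



set_option maxHeartbeats 2000000 in
theorem pvMain (data : List (List (String × String))) :
    build_introductory_part data = build_introductory_part_alt data := by
  by_cases hd : data = []
  · subst hd; rfl
  cases h1 : data.dropWhile (fun b => !(pvTy b == some "title")) with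
  | nil =>
    have hall : ∀ b ∈ data, (pvTy b == some "title") = false := by
      intro b hb
      have := (List.dropWhile_eq_nil_iff).1 h1 b hb
      simpa using this
    have hti : pvTiOf data 0 = [] := pvTiOf_nil data 0 hall
    have hA : build_introductory_part data = (data, false, "No title blocks found.") := by
      simp only [build_introductory_part, if_neg hd]
      rw [show ((PySem.List.enumerate data 0).filter (fun pr => pvTy pr.2 == some "title")).map (·.1)
            = pvTiOf data 0 from rfl, hti]
    have hscan : pvScanB data 0 "" "" [] (PySem.List.enumerate data 0) = (0, "", "", [], []) := by
      have := pvScanB0 data data hall 0 [] "" "" []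
      simpa using this
    have hB : build_introductory_part_alt data = (data, false, "No title blocks found.") := by
      simp only [build_introductory_part_alt, if_neg hd, hscan]
      simp
    rw [hA, hB]
  | cons b0 m =>
    have hdataeq : data = data.takeWhile (fun b => !(pvTy b == some "title")) ++ b0 :: m := by
      conv_lhs => rw [← List.takeWhile_append_dropWhile (p := fun b => !(pvTy b == some "title")) (l := data)]
      rw [h1]
    set p := data.takeWhile (fun b => !(pvTy b == some "title")) with hp
    have hpall : ∀ b ∈ p, (pvTy b == some "title") = false := by
      intro b hb
      have := List.mem_takeWhile_imp hb
      simpa using this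
    have hb0 : (pvTy b0 == some "title") = true := by
      have h2 : data.dropWhile (fun b => !(pvTy b == some "title")) ≠ [] := by simp [h1]
      have h3 := List.head_dropWhile_not (fun b => !(pvTy b == some "title")) h2
      simp only [h1] at h3
      simpa using h3
    have hti : pvTiOf data 0 = ((p.length : Int)) :: pvTiOf m ((p.length : Int) + 1) := by
      conv_lhs => rw [hdataeq]
      rw [pvTiOf_append, pvTiOf_nil p 0 hpall, pvTiOf_cons, if_pos hb0]
      simp
    have hft : PySem.List.pyGetD data ((p.length : Int)) [] = b0 := by
      conv_lhs => rw [hdataeq]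
      exact pvGetAt p b0 m []
    have hgetK : ∀ (k : Nat), (hk : k < m.length) →
        PySem.List.pyGetD data ((p.length : Int) + 1 + (k : Int)) [] = m[k] := by
      intro k hk
      have hsh : data = (p ++ [b0]) ++ m ++ [] := by simp [hdataeq]
      have := pvGetAtK (p ++ [b0]) m [] ([] : List (String × String)) k hk
      rw [← hsh] at this
      rw [show (p.length : Int) + 1 + (k : Int) = (((p ++ [b0]).length : Int)) + (k : Int) by
        simp]
      exact this
    cases h2 : m.dropWhile (fun b => !(pvStop b)) with
    | nil =>
      have hmall : ∀ b ∈ m, pvStop b = false := by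
        intro b hb
        have := (List.dropWhile_eq_nil_iff).1 h2 b hb
        simpa using this
      have hfind : (((p.length : Int)) :: pvTiOf m ((p.length : Int) + 1)).find?
          (fun i => !(i ≤ (p.length : Int)) &&
            pvIntroPredA (PySem.Str.strip (pvContent (PySem.List.pyGetD data i [])))) = none := by
        rw [List.find?_cons_of_neg (by simp)]
        apply pvFind_tiOf_none
        intro k hk hT
        have hmem : m[k] ∈ m := List.getElem_mem hk
        have hstop := hmall m[k] hmem
        have hpredB : (pvIntroCheckB m[k]).1 = false := by
          simp only [pvStop, pvIsT, hT, Bool.true_and] at hstop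
          exact hstop
        have hpredA : pvIntroPredA (PySem.Str.strip (pvContent m[k])) = false := by
          rw [← pvIntroCheck_fst m[k]]
          exact hpredB
        rw [hgetK k hk]
        simp [hpredA]
      have hA : build_introductory_part data =
          (data, false, "No introduction title found. First title: '" ++ pvContent b0 ++ "'.") := by
        simp only [build_introductory_part, if_neg hd]
        rw [show ((PySem.List.enumerate data 0).filter (fun pr => pvTy pr.2 == some "title")).map (·.1)
              = pvTiOf data 0 from rfl, hti]
        simp only [hfind, hft]
      have hscan : pvScanB data 0 "" "" [] (PySem.List.enumerate data 0) =
          (1, pvContent b0, "", (m.filter pvIsX).map pvContent, []) := by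
        have henum : PySem.List.enumerate data 0 =
            PySem.List.enumerate p 0 ++ PySem.List.enumerate (b0 :: m) ((p.length : Int)) := by
          conv_lhs => rw [hdataeq]
          rw [PySem.List.enumerate_append]
          norm_num
        rw [henum, pvScanB0 data p hpall]
        rw [PySem.List.enumerate_cons]
        simp only [pvScanB, hb0]
        rw [show PySem.List.enumerate m ((p.length : Int) + 1) =
              PySem.List.enumerate m ((p.length : Int) + 1) ++ [] by simp]
        rw [pvScanB1 data m hmall]
        simp [pvScanB]
      have hB : build_introductory_part_alt data =
          (data, false, "No introduction title found. First title: '" ++ pvContent b0 ++ "'.") := by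
        simp only [build_introductory_part_alt, if_neg hd, hscan]
        simp
      rw [hA, hB]
    | cons b1 r =>
      have hmeq : m = m.takeWhile (fun b => !(pvStop b)) ++ b1 :: r := by
        conv_lhs => rw [← List.takeWhile_append_dropWhile (p := fun b => !(pvStop b)) (l := m)]
        rw [h2]
      set q := m.takeWhile (fun b => !(pvStop b)) with hq
      have hqall : ∀ b ∈ q, pvStop b = false := by
        intro b hb
        have := List.mem_takeWhile_imp hb
        simpa using this
      have hstop1 : pvStop b1 = true := by
        have hne : m.dropWhile (fun b => !(pvStop b)) ≠ [] := by simp [h2]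
        have h3 := List.head_dropWhile_not (fun b => !(pvStop b)) hne
        simp only [h2] at h3
        simpa using h3
      have hT1 : (pvTy b1 == some "title") = true := by
        have := hstop1
        simp only [pvStop, pvIsT, Bool.and_eq_true] at this
        exact this.1
      have hc1 : (pvIntroCheckB b1).1 = true := by
        have := hstop1
        simp only [pvStop, pvIsT, Bool.and_eq_true] at this
        exact this.2
      have hdata2 : data = (p ++ b0 :: q) ++ b1 :: r := by
        rw [hdataeq]
        conv_lhs => rw [hmeq]
        simp
      have hgi : PySem.List.pyGetD data ((p.length : Int) + 1 + (q.length : Int)) [] = b1 := by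
        conv_lhs => rw [hdata2]
        have := pvGetAt (p ++ b0 :: q) b1 r []
        rw [show (((p ++ b0 :: q).length : Int)) = (p.length : Int) + 1 + (q.length : Int) by
          simp; ring] at this
        exact this
      have htm : pvTiOf m ((p.length : Int) + 1) =
          pvTiOf q ((p.length : Int) + 1) ++
            (((p.length : Int) + 1 + (q.length : Int)) :: pvTiOf r ((p.length : Int) + 1 + (q.length : Int) + 1)) := by
        conv_lhs => rw [hmeq]
        rw [pvTiOf_append, pvTiOf_cons, if_pos hT1]
      have hgetQ : ∀ (k : Nat), (hk : k < q.length) →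
          PySem.List.pyGetD data ((p.length : Int) + 1 + (k : Int)) [] = q[k] := by
        intro k hk
        have hsh : data = (p ++ [b0]) ++ q ++ (b1 :: r) := by
          rw [hdata2]; simp
        have := pvGetAtK (p ++ [b0]) q (b1 :: r) ([] : List (String × String)) k hk
        rw [← hsh] at this
        rw [show (p.length : Int) + 1 + (k : Int) = (((p ++ [b0]).length : Int)) + (k : Int) by simp]
        exact this
      have hqnone : (pvTiOf q ((p.length : Int) + 1)).find?
          (fun i => !(i ≤ (p.length : Int)) &&
            pvIntroPredA (PySem.Str.strip (pvContent (PySem.List.pyGetD data i [])))) = none := by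
        apply pvFind_tiOf_none
        intro k hk hT
        have hstop := hqall q[k] (List.getElem_mem hk)
        have hpredB : (pvIntroCheckB q[k]).1 = false := by
          simp only [pvStop, pvIsT, hT, Bool.true_and] at hstop
          exact hstop
        have hpredA : pvIntroPredA (PySem.Str.strip (pvContent q[k])) = false := by
          rw [← pvIntroCheck_fst q[k]]
          exact hpredB
        rw [hgetQ k hk]
        simp [hpredA]
      have hfind : (((p.length : Int)) :: pvTiOf m ((p.length : Int) + 1)).find?
          (fun i => !(i ≤ (p.length : Int)) &&
            pvIntroPredA (PySem.Str.strip (pvContent (PySem.List.pyGetD data i [])))) =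
          some ((p.length : Int) + 1 + (q.length : Int)) := by
        rw [List.find?_cons_of_neg (by simp), htm, List.find?_append, hqnone]
        rw [Option.none_or]
        apply List.find?_cons_of_pos
        rw [hgi]
        have hd1 : ¬((p.length : Int) + 1 + (q.length : Int) ≤ (p.length : Int)) := by omega
        have hd2 : pvIntroPredA (PySem.Str.strip (pvContent b1)) = true := by
          rw [← pvIntroCheck_fst b1]
          exact hc1
        simp [hd1, hd2]
      have hnextpre : ∀ (tl : List Int),
          (((p.length : Int)) :: (pvTiOf q ((p.length : Int) + 1) ++
              (((p.length : Int) + 1 + (q.length : Int)) :: tl))).find?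
            (fun i => decide (((p.length : Int) + 1 + (q.length : Int)) < i)) =
          tl.find? (fun i => decide (((p.length : Int) + 1 + (q.length : Int)) < i)) := by
        intro tl
        rw [List.find?_cons_of_neg (by simp; omega), List.find?_append]
        rw [pvFind_tiOf_none _ q _ (by intro k hk _; simp; omega)]
        rw [Option.none_or, List.find?_cons_of_neg (by simp)]
      have hfoldq := pvFoldRange data (p ++ [b0]) q (b1 :: r) ([] : List String)
        ((p.length : Int) + 1) ((p.length : Int) + 1 + (q.length : Int))
        (by rw [hdata2]; simp) (by simp) (by simp)
      cases h3 : r.dropWhile (fun b => !(pvTy b == some "title")) with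
      | nil =>
        have hrall : ∀ b ∈ r, (pvTy b == some "title") = false := by
          intro b hb
          have := (List.dropWhile_eq_nil_iff).1 h3 b hb
          simpa using this
        have hnext : (((p.length : Int)) :: pvTiOf m ((p.length : Int) + 1)).find?
            (fun i => decide (((p.length : Int) + 1 + (q.length : Int)) < i)) = none := by
          rw [htm, hnextpre, pvTiOf_nil r _ hrall, List.find?_nil]
        have hcoll : pvCollectA data ((p.length : Int)) ((p.length : Int) + 1 + (q.length : Int)) (-1) =
            ((q.filter pvIsX).map pvContent ++ [pvContent b1]) ++ (r.filter pvIsX).map pvContent := by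
          simp only [pvCollectA]
          rw [hfoldq]
          rw [hgi]
          rw [if_neg (by simp)]
          rw [pvFoldRange data (p ++ b0 :: q ++ [b1]) r ([] : List (List (String × String)))
              ([] ++ (q.filter pvIsX).map pvContent ++ [pvContent b1])
              ((p.length : Int) + 1 + (q.length : Int) + 1) ((data.length : Int))
              (by rw [hdata2]; simp) (by simp; ring) (by rw [hdata2]; simp; ring)]
          simp
        have hA : build_introductory_part data =
            ([[("type", "Title"), ("content", pvContent b0)],
              [("type", "introductory-part"), ("content", PySem.Str.join " "
                (((q.filter pvIsX).map pvContent ++ [pvContent b1]) ++ (r.filter pvIsX).map pvContent))]],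
             true, "Introductory-part built; intro title: '" ++ PySem.Str.strip (pvContent b1) ++ "'.") := by
          simp only [build_introductory_part, if_neg hd]
          rw [show ((PySem.List.enumerate data 0).filter (fun pr => pvTy pr.2 == some "title")).map (·.1)
                = pvTiOf data 0 from rfl, hti]
          simp only [hfind, hnext, hft, hgi, hcoll]
          simp
        have hscan : pvScanB data 0 "" "" [] (PySem.List.enumerate data 0) =
            (2, pvContent b0, PySem.Str.strip (pvContent b1),
             ((q.filter pvIsX).map pvContent ++ [pvContent b1]) ++ (r.filter pvIsX).map pvContent, []) := by
          have henum : PySem.List.enumerate data 0 =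
              PySem.List.enumerate p 0 ++ PySem.List.enumerate (b0 :: m) ((p.length : Int)) := by
            conv_lhs => rw [hdataeq]
            rw [PySem.List.enumerate_append]
            norm_num
          rw [henum, pvScanB0 data p hpall]
          rw [PySem.List.enumerate_cons]
          simp only [pvScanB, hb0]
          have henum2 : PySem.List.enumerate m ((p.length : Int) + 1) =
              PySem.List.enumerate q ((p.length : Int) + 1) ++
                PySem.List.enumerate (b1 :: r) ((p.length : Int) + 1 + (q.length : Int)) := by
            conv_lhs => rw [hmeq]
            rw [PySem.List.enumerate_append]
          rw [henum2, pvScanB1 data q hqall]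
          rw [PySem.List.enumerate_cons]
          simp only [pvScanB, hT1, hc1]
          rw [show PySem.List.enumerate r ((p.length : Int) + 1 + (q.length : Int) + 1) =
                PySem.List.enumerate r ((p.length : Int) + 1 + (q.length : Int) + 1) ++ [] by simp]
          rw [pvScanB2 data r hrall]
          simp only [pvScanB]
          rw [pvIntroCheck_snd b1]
          simp
        have hB : build_introductory_part_alt data =
            ([[("type", "Title"), ("content", pvContent b0)],
              [("type", "introductory-part"), ("content", PySem.Str.join " "
                (((q.filter pvIsX).map pvContent ++ [pvContent b1]) ++ (r.filter pvIsX).map pvContent))]],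
             true, "Introductory-part built; intro title: '" ++ PySem.Str.strip (pvContent b1) ++ "'.") := by
          simp only [build_introductory_part_alt, if_neg hd, hscan]
          simp
        rw [hA, hB]
      | cons b2 v =>
        have hreq : r = r.takeWhile (fun b => !(pvTy b == some "title")) ++ b2 :: v := by
          conv_lhs => rw [← List.takeWhile_append_dropWhile (p := fun b => !(pvTy b == some "title")) (l := r)]
          rw [h3]
        set u := r.takeWhile (fun b => !(pvTy b == some "title")) with hu
        have huall : ∀ b ∈ u, (pvTy b == some "title") = false := by
          intro b hb
          have := List.mem_takeWhile_imp hb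
          simpa using this
        have hb2 : (pvTy b2 == some "title") = true := by
          have hne : r.dropWhile (fun b => !(pvTy b == some "title")) ≠ [] := by simp [h3]
          have h4 := List.head_dropWhile_not (fun b => !(pvTy b == some "title")) hne
          simp only [h3] at h4
          simpa using h4
        have htr : pvTiOf r ((p.length : Int) + 1 + (q.length : Int) + 1) =
            ((p.length : Int) + 1 + (q.length : Int) + 1 + (u.length : Int)) ::
              pvTiOf v ((p.length : Int) + 1 + (q.length : Int) + 1 + (u.length : Int) + 1) := by
          conv_lhs => rw [hreq]
          rw [pvTiOf_append, pvTiOf_nil u _ huall, pvTiOf_cons, if_pos hb2]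
          simp
        have hnext : (((p.length : Int)) :: pvTiOf m ((p.length : Int) + 1)).find?
            (fun i => decide (((p.length : Int) + 1 + (q.length : Int)) < i)) =
            some ((p.length : Int) + 1 + (q.length : Int) + 1 + (u.length : Int)) := by
          rw [htm, hnextpre, htr]
          exact List.find?_cons_of_pos (by simp; omega)
        have hdata3 : data = (p ++ b0 :: q ++ b1 :: u) ++ b2 :: v := by
          rw [hdata2]
          conv_lhs => rw [hreq]
          simp
        have hslice : PySem.List.slice data
            (some ((p.length : Int) + 1 + (q.length : Int) + 1 + (u.length : Int))) none = b2 :: v := by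
          rw [PySem.List.slice_from (xs := data)
              (a := (p.length : Int) + 1 + (q.length : Int) + 1 + (u.length : Int)) (by omega)]
          rw [show ((p.length : Int) + 1 + (q.length : Int) + 1 + (u.length : Int)).toNat
                = (p ++ b0 :: q ++ b1 :: u).length by simp; omega]
          conv_lhs => rw [hdata3]
          exact List.drop_left
        have hcoll : pvCollectA data ((p.length : Int)) ((p.length : Int) + 1 + (q.length : Int))
            ((p.length : Int) + 1 + (q.length : Int) + 1 + (u.length : Int)) =
            ((q.filter pvIsX).map pvContent ++ [pvContent b1]) ++ (u.filter pvIsX).map pvContent := by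
          simp only [pvCollectA]
          rw [hfoldq]
          rw [hgi]
          rw [if_pos (by omega)]
          rw [pvFoldRange data (p ++ b0 :: q ++ [b1]) u (b2 :: v)
              ([] ++ (q.filter pvIsX).map pvContent ++ [pvContent b1])
              ((p.length : Int) + 1 + (q.length : Int) + 1)
              ((p.length : Int) + 1 + (q.length : Int) + 1 + (u.length : Int))
              (by rw [hdata3]; simp) (by simp; ring) (by ring)]
          simp
        have hA : build_introductory_part data =
            ([[("type", "Title"), ("content", pvContent b0)],
              [("type", "introductory-part"), ("content", PySem.Str.join " "
                (((q.filter pvIsX).map pvContent ++ [pvContent b1]) ++ (u.filter pvIsX).map pvContent))]]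
              ++ (b2 :: v),
             true, "Introductory-part built; intro title: '" ++ PySem.Str.strip (pvContent b1) ++ "'.") := by
          simp only [build_introductory_part, if_neg hd]
          rw [show ((PySem.List.enumerate data 0).filter (fun pr => pvTy pr.2 == some "title")).map (·.1)
                = pvTiOf data 0 from rfl, hti]
          simp only [hfind, hnext, hft, hgi, hcoll]
          rw [if_pos (by omega)]
          rw [hslice]
        have hscan : pvScanB data 0 "" "" [] (PySem.List.enumerate data 0) =
            (3, pvContent b0, PySem.Str.strip (pvContent b1),
             ((q.filter pvIsX).map pvContent ++ [pvContent b1]) ++ (u.filter pvIsX).map pvContent,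
             b2 :: v) := by
          have henum : PySem.List.enumerate data 0 =
              PySem.List.enumerate p 0 ++ PySem.List.enumerate (b0 :: m) ((p.length : Int)) := by
            conv_lhs => rw [hdataeq]
            rw [PySem.List.enumerate_append]
            norm_num
          rw [henum, pvScanB0 data p hpall]
          rw [PySem.List.enumerate_cons]
          simp only [pvScanB, hb0]
          have henum2 : PySem.List.enumerate m ((p.length : Int) + 1) =
              PySem.List.enumerate q ((p.length : Int) + 1) ++
                PySem.List.enumerate (b1 :: r) ((p.length : Int) + 1 + (q.length : Int)) := by
            conv_lhs => rw [hmeq]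
            rw [PySem.List.enumerate_append]
          rw [henum2, pvScanB1 data q hqall]
          rw [PySem.List.enumerate_cons]
          simp only [pvScanB, hT1, hc1]
          have henum3 : PySem.List.enumerate r ((p.length : Int) + 1 + (q.length : Int) + 1) =
              PySem.List.enumerate u ((p.length : Int) + 1 + (q.length : Int) + 1) ++
                PySem.List.enumerate (b2 :: v)
                  ((p.length : Int) + 1 + (q.length : Int) + 1 + (u.length : Int)) := by
            conv_lhs => rw [hreq]
            rw [PySem.List.enumerate_append]
          rw [henum3, pvScanB2 data u huall]
          rw [PySem.List.enumerate_cons]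
          simp only [pvScanB, hb2]
          rw [pvIntroCheck_snd b1, hslice]
          simp
        have hB : build_introductory_part_alt data =
            ([[("type", "Title"), ("content", pvContent b0)],
              [("type", "introductory-part"), ("content", PySem.Str.join " "
                (((q.filter pvIsX).map pvContent ++ [pvContent b1]) ++ (u.filter pvIsX).map pvContent))]]
              ++ (b2 :: v),
             true, "Introductory-part built; intro title: '" ++ PySem.Str.strip (pvContent b1) ++ "'.") := by
          simp only [build_introductory_part_alt, if_neg hd, hscan]
          simp
        rw [hA, hB]

-- ===== VERDICT (by name: the statement is the Claim_ definition above) =====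
theorem build_introductory_part_spec : Claim_equal_build_introductory_part := by
  intro data _ _
  unfold Spec_build_introductory_part
  exact pvMain data
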